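-- pv_equiv track=rewrite | github.com/michael-abdo/typing-clients-ingestion | match_operator_data.py | categorize_links
-- ===== SOURCE A (Python) =====
-- from typing import Dict, List, Tuple
--
-- def categorize_links(links: List[str]) -> Dict[str, List[str]]:
--     """Categorize links by type"""
--     categorized = {
--         'youtube_videos': [],
--         'youtube_playlists': [],
--         'drive_files': [],
--         'drive_folders': []
--     }
--
--     for link in links:
--         if 'youtube.com/playlist' in link:
--             categorized['youtube_playlists'].append(link)
--         elif 'youtube.com/watch' in link or 'youtu.be' in link:
--             categorized['youtube_videos'].append(link)
--         elif 'drive.google.com/drive/folders' in link: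
--             categorized['drive_folders'].append(link)
--         elif 'drive.google.com/file' in link:
--             categorized['drive_files'].append(link)
--
--     return categorized
-- ===== SOURCE B (Python) =====
-- def categorize_links(links):
--     """Categorize links by type: one filtering pass per category (priority encoded
--     by excluding higher-priority matches), instead of a per-link dispatch loop."""
--     is_pl = lambda l: 'youtube.com/playlist' in l
--     is_vid = lambda l: 'youtube.com/watch' in l or 'youtu.be' in l
--     is_fold = lambda l: 'drive.google.com/drive/folders' in l
--     is_file = lambda l: 'drive.google.com/file' in l
--     return {
--         'youtube_videos': [l for l in links if not is_pl(l) and is_vid(l)],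
--         'youtube_playlists': [l for l in links if is_pl(l)],
--         'drive_files': [l for l in links if not is_pl(l) and not is_vid(l) and not is_fold(l) and is_file(l)],
--         'drive_folders': [l for l in links if not is_pl(l) and not is_vid(l) and is_fold(l)],
--     }
-- ===== Notes on version B (the rewrite author's own statement) =====
-- stated objective: alternative
-- what changed: Replaces A's single pass that dispatches each link through an elif cascade into a mutable dict with four independent filter passes, one per category, where the elif priority is encoded as explicit exclusion of higher-priority matches in each filter predicate.
import Mathlib
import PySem

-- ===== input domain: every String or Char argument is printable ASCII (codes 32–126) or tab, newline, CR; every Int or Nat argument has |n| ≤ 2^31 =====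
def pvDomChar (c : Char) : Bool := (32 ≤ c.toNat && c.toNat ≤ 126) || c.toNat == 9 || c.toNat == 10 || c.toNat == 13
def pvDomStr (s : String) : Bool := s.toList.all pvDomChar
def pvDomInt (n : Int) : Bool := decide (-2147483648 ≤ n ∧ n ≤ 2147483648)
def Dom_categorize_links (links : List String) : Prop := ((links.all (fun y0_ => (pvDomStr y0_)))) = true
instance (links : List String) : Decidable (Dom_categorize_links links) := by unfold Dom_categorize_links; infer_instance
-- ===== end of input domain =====

-- B replaces A's single-pass per-link elif dispatch into a mutable dict with four
-- independent per-category filter passes (priority encoded as exclusions); same value.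

-- ===== PORT A =====
def catA_step (d : PySem.Dict String (List String)) (link : String) : PySem.Dict String (List String) :=
  if PySem.Str.isIn "youtube.com/playlist" link then
    PySem.Dict.modify d "youtube_playlists" [] (fun l => l ++ [link])
  else if PySem.Str.isIn "youtube.com/watch" link || PySem.Str.isIn "youtu.be" link then
    PySem.Dict.modify d "youtube_videos" [] (fun l => l ++ [link])
  else if PySem.Str.isIn "drive.google.com/drive/folders" link then
    PySem.Dict.modify d "drive_folders" [] (fun l => l ++ [link])
  else if PySem.Str.isIn "drive.google.com/file" link then
    PySem.Dict.modify d "drive_files" [] (fun l => l ++ [link])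
  else d

def categorize_links (links : List String) : List (String × List String) :=
  (links.foldl catA_step
    (PySem.Dict.ofList [("youtube_videos", []), ("youtube_playlists", []),
                        ("drive_files", []), ("drive_folders", [])])).items

-- ===== PORT B =====
def catB_isPl (l : String) : Bool := PySem.Str.isIn "youtube.com/playlist" l
def catB_isVid (l : String) : Bool := PySem.Str.isIn "youtube.com/watch" l || PySem.Str.isIn "youtu.be" l
def catB_isFold (l : String) : Bool := PySem.Str.isIn "drive.google.com/drive/folders" l
def catB_isFile (l : String) : Bool := PySem.Str.isIn "drive.google.com/file" l

def categorize_links_alt (links : List String) : List (String × List String) :=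
  [("youtube_videos", links.filter (fun l => !catB_isPl l && catB_isVid l)),
   ("youtube_playlists", links.filter (fun l => catB_isPl l)),
   ("drive_files", links.filter (fun l => !catB_isPl l && !catB_isVid l && !catB_isFold l && catB_isFile l)),
   ("drive_folders", links.filter (fun l => !catB_isPl l && !catB_isVid l && catB_isFold l))]

-- ===== PRECONDITION & SPEC =====
def Spec_categorize_links (links : List String) (out : List (String × List String)) : Prop := out = categorize_links_alt links
instance (links : List String) (out : List (String × List String)) : Decidable (Spec_categorize_links links out) := by unfold Spec_categorize_links; infer_instance

-- ===== CLAIM =====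
def Claim_equal_categorize_links : Prop := ∀ (links : List String), Dom_categorize_links links → Spec_categorize_links links (categorize_links links)

-- ===== LEMMAS AND PROOFS =====
-- invariant of A's loop: folding from any dict with exactly these four keys appends,
-- per key, exactly the links B's corresponding filter selects
theorem catA_fold_items (links : List String) :
    ∀ (v p f fo : List String),
    (links.foldl catA_step
      (PySem.Dict.mk [("youtube_videos", v), ("youtube_playlists", p),
                      ("drive_files", f), ("drive_folders", fo)])).items
    = [("youtube_videos", v ++ links.filter (fun l => !catB_isPl l && catB_isVid l)),
       ("youtube_playlists", p ++ links.filter (fun l => catB_isPl l)),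
       ("drive_files", f ++ links.filter (fun l => !catB_isPl l && !catB_isVid l && !catB_isFold l && catB_isFile l)),
       ("drive_folders", fo ++ links.filter (fun l => !catB_isPl l && !catB_isVid l && catB_isFold l))] := by
  induction links with
  | nil => intro v p f fo; simp
  | cons x xs ih =>
    intro v p f fo
    simp only [List.foldl_cons, catA_step, List.filter_cons]
    by_cases h1 : PySem.Str.isIn "youtube.com/playlist" x = true
    · have : (PySem.Dict.mk [("youtube_videos", v), ("youtube_playlists", p),
          ("drive_files", f), ("drive_folders", fo)]).modify "youtube_playlists" [] (fun l => l ++ [x])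
          = PySem.Dict.mk [("youtube_videos", v), ("youtube_playlists", p ++ [x]),
          ("drive_files", f), ("drive_folders", fo)] := by
        simp [PySem.Dict.modify, PySem.Dict.insert, PySem.Dict.getD, PySem.Dict.get?, PySem.Dict.contains]
      simp at h1
      simp [h1, this, ih, catB_isPl]
    · by_cases h2 : (PySem.Str.isIn "youtube.com/watch" x || PySem.Str.isIn "youtu.be" x) = true
      · have : (PySem.Dict.mk [("youtube_videos", v), ("youtube_playlists", p),
            ("drive_files", f), ("drive_folders", fo)]).modify "youtube_videos" [] (fun l => l ++ [x])
            = PySem.Dict.mk [("youtube_videos", v ++ [x]), ("youtube_playlists", p),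
            ("drive_files", f), ("drive_folders", fo)] := by
          simp [PySem.Dict.modify, PySem.Dict.insert, PySem.Dict.getD, PySem.Dict.get?, PySem.Dict.contains]
        simp at h1 h2
        rcases h2 with h2 | h2 <;>
          simp [h1, h2, this, ih, catB_isPl, catB_isVid, catB_isFold, catB_isFile]
      · by_cases h3 : PySem.Str.isIn "drive.google.com/drive/folders" x = true
        · have : (PySem.Dict.mk [("youtube_videos", v), ("youtube_playlists", p),
              ("drive_files", f), ("drive_folders", fo)]).modify "drive_folders" [] (fun l => l ++ [x])
              = PySem.Dict.mk [("youtube_videos", v), ("youtube_playlists", p),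
              ("drive_files", f), ("drive_folders", fo ++ [x])] := by
            simp [PySem.Dict.modify, PySem.Dict.insert, PySem.Dict.getD, PySem.Dict.get?, PySem.Dict.contains]
          simp at h1 h2 h3
          simp [h1, h2, h3, this, ih, catB_isPl, catB_isVid, catB_isFold]
        · by_cases h4 : PySem.Str.isIn "drive.google.com/file" x = true
          · have : (PySem.Dict.mk [("youtube_videos", v), ("youtube_playlists", p),
                ("drive_files", f), ("drive_folders", fo)]).modify "drive_files" [] (fun l => l ++ [x])
                = PySem.Dict.mk [("youtube_videos", v), ("youtube_playlists", p),
                ("drive_files", f ++ [x]), ("drive_folders", fo)] := by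
              simp [PySem.Dict.modify, PySem.Dict.insert, PySem.Dict.getD, PySem.Dict.get?, PySem.Dict.contains]
            simp at h1 h2 h3 h4
            simp [h1, h2, h3, h4, this, ih, catB_isPl, catB_isVid, catB_isFold, catB_isFile]
          · simp at h1 h2 h3 h4
            simp [h1, h2, h3, h4, ih, catB_isPl, catB_isVid, catB_isFold, catB_isFile]

-- ===== VERDICT =====
theorem categorize_links_spec : Claim_equal_categorize_links := by
  intro links _
  show categorize_links links = categorize_links_alt links
  unfold categorize_links categorize_links_alt
  have : PySem.Dict.ofList ([("youtube_videos", []), ("youtube_playlists", []),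
      ("drive_files", []), ("drive_folders", [])] : List (String × List String))
      = PySem.Dict.mk [("youtube_videos", []), ("youtube_playlists", []),
      ("drive_files", []), ("drive_folders", [])] := by decide
  rw [this, catA_fold_items]
  simp
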